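-- pv_equiv track=rewrite | github.com/eliottcassidy2000/math | 04-computation/verify_tribonacci_proof.py | ham_path_to_run_decomposition
-- ===== SOURCE A (Python) =====
-- def ham_path_to_run_decomposition(path):
--     """Convert a Hamiltonian path to its run decomposition.
--     A 'run' is a maximal ascending consecutive subsequence.
--     """
--     if len(path) == 0:
--         return []
--
--     runs = []
--     current_run = [path[0]]
--     for i in range(1, len(path)):
--         if path[i] == path[i-1] + 1:
--             current_run.append(path[i])
--         else:
--             runs.append((min(current_run), max(current_run)))
--             current_run = [path[i]]
--     runs.append((min(current_run), max(current_run)))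
--     return runs
-- ===== SOURCE B (Python) =====
-- def ham_path_to_run_decomposition(path):
--     if not path:
--         return []
--     # pass 1: collect all run boundaries (cut points), with sentinels 0 and len(path)
--     bounds = [0]
--     for i in range(1, len(path)):
--         if path[i] != path[i - 1] + 1:
--             bounds.append(i)
--     bounds.append(len(path))
--     # pass 2: emit (first, last) for each consecutive boundary pair
--     return [(path[s], path[e - 1]) for s, e in zip(bounds, bounds[1:])]
-- ===== Notes on version B (the rewrite author's own statement) =====
-- stated objective: alternative
-- what changed: Replaces the current_run accumulator with min/max flushes by two distinct phases: first collect all cut indices (boundary table with sentinels 0 and len), then emit (path[start], path[end-1]) for each consecutive boundary pair.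
import Mathlib
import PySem

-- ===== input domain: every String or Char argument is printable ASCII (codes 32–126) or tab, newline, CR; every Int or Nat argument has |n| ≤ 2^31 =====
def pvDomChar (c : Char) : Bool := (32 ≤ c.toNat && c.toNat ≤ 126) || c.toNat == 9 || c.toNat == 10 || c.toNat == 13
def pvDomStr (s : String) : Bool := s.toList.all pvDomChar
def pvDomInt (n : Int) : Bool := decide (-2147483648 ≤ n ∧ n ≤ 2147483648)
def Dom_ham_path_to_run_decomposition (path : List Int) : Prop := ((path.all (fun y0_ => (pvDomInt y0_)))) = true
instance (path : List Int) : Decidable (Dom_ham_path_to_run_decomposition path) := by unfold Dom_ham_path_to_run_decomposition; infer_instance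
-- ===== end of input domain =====

-- B rebuilds the decomposition from an explicit boundary-index table in two passes
-- instead of A's single accumulator loop with min/max flushes; same cost, different shape.

-- ===== PORT A =====
-- min()/max() of a nonempty list; exact for Python here since current_run is never empty
def pyMinNE (xs : List Int) : Int := (PySem.List.min? xs (fun x => x)).getD 0
def pyMaxNE (xs : List Int) : Int := (PySem.List.max? xs (fun x => x)).getD 0

-- the body of A's for-loop, acting on the state (runs, current_run)
def hamStepA (path : List Int) (s : List (Int × Int) × List Int) (i : Int) :
    List (Int × Int) × List Int :=
  if PySem.List.pyGetD path i 0 = PySem.List.pyGetD path (i - 1) 0 + 1 then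
    (s.1, s.2 ++ [PySem.List.pyGetD path i 0])
  else
    (s.1 ++ [(pyMinNE s.2, pyMaxNE s.2)], [PySem.List.pyGetD path i 0])

-- the trailing runs.append((min(current_run), max(current_run)))
def hamFlush (st : List (Int × Int) × List Int) : List (Int × Int) :=
  st.1 ++ [(pyMinNE st.2, pyMaxNE st.2)]

def ham_path_to_run_decomposition (path : List Int) : List (Int × Int) :=
  if path.length = 0 then []
  else
    hamFlush ((PySem.List.pyRange 1 (path.length : Int) 1).foldl (hamStepA path)
      ([], [PySem.List.pyGetD path 0 0]))

-- ===== PORT B =====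
-- pass 1 of Source B: the boundary indices appended for i in range(1, m) (m = len(path))
def hamCutsTo (path : List Int) (m : Int) : List Int :=
  (PySem.List.pyRange 1 m 1).filter
    (fun i => decide (¬ PySem.List.pyGetD path i 0 = PySem.List.pyGetD path (i - 1) 0 + 1))

-- the comprehension body of Source B's pass 2
def hamEmit (path : List Int) (se : Int × Int) : Int × Int :=
  (PySem.List.pyGetD path se.1 0, PySem.List.pyGetD path (se.2 - 1) 0)

-- pass 2 of Source B: zip consecutive boundary pairs and emit
def hamPairsEmit (path : List Int) (bounds : List Int) : List (Int × Int) :=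
  (bounds.zip bounds.tail).map (hamEmit path)

def ham_path_to_run_decomposition_alt (path : List Int) : List (Int × Int) :=
  if path = [] then []
  else
    hamPairsEmit path ((0 :: hamCutsTo path (path.length : Int)) ++ [(path.length : Int)])

-- ===== PRECONDITION & SPEC =====
def Spec_ham_path_to_run_decomposition (path : List Int) (out : List (Int × Int)) : Prop := out = ham_path_to_run_decomposition_alt path
instance (path : List Int) (out : List (Int × Int)) : Decidable (Spec_ham_path_to_run_decomposition path out) := by unfold Spec_ham_path_to_run_decomposition; infer_instance

-- ===== CLAIM (what is proved, stated in full; the proofs are below) =====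
def Claim_equal_ham_path_to_run_decomposition : Prop := ∀ (path : List Int), Dom_ham_path_to_run_decomposition path → Spec_ham_path_to_run_decomposition path (ham_path_to_run_decomposition path)

-- ===== LEMMAS AND PROOFS =====

theorem foldl_min_of_le (t : List Int) (a : Int) (h : ∀ x ∈ t, a ≤ x) :
    t.foldl min a = a := by
  induction t with
  | nil => rfl
  | cons b t ih =>
      have hab : a ≤ b := h b (by simp)
      simp only [List.foldl_cons, min_eq_left hab]
      exact ih (fun x hx => h x (by simp [hx]))

theorem foldl_max_le (t : List Int) (z x : Int) (hz : z ≤ x) (h : ∀ y ∈ t, y ≤ x) :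
    t.foldl max z ≤ x := by
  induction t generalizing z with
  | nil => exact hz
  | cons b t ih =>
      exact ih _ (max_le hz (h b (by simp))) (fun y hy => h y (by simp [hy]))

theorem pyMinNE_pyRange (a : Int) (b : Int) (h : a < b) :
    pyMinNE (PySem.List.pyRange a b 1) = a := by
  rw [pyMinNE, PySem.List.pyRange_one_cons h, PySem.List.min?_id_cons]
  simp only [Option.getD_some]
  exact foldl_min_of_le _ _ (fun x hx => by
    have := (PySem.List.mem_pyRange_one).1 hx; omega)

theorem pyMaxNE_append_singleton (xs : List Int) (x : Int) (h : ∀ y ∈ xs, y ≤ x) :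
    pyMaxNE (xs ++ [x]) = x := by
  cases xs with
  | nil => simp [pyMaxNE, PySem.List.max?_id_cons]
  | cons z t =>
      rw [pyMaxNE, List.cons_append, PySem.List.max?_id_cons]
      simp only [Option.getD_some, List.foldl_append, List.foldl_cons, List.foldl_nil]
      exact max_eq_right (foldl_max_le t z x (h z (by simp))
        (fun y hy => h y (by simp [hy])))

theorem pyMaxNE_pyRange (a : Int) (b : Int) (h : a < b) :
    pyMaxNE (PySem.List.pyRange a b 1) = b - 1 := by
  have hb : a ≤ b - 1 := by omega
  have hsp : PySem.List.pyRange a b 1 = PySem.List.pyRange a (b - 1) 1 ++ [b - 1] := by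
    have h2 := PySem.List.pyRange_one_succ_right (a := a) (b := b - 1) hb
    rw [show b - 1 + 1 = b by ring] at h2
    exact h2
  rw [hsp]
  exact pyMaxNE_append_singleton _ _ (fun y hy => by
    have := (PySem.List.mem_pyRange_one).1 hy; omega)

theorem zip_tail_append_singleton (l : List Int) (j x : Int) (h : l.getLast? = some j) :
    ((l ++ [x]).zip (l ++ [x]).tail) = (l.zip l.tail) ++ [(j, x)] := by
  induction l with
  | nil => simp at h
  | cons a t ih =>
      cases t with
      | nil => simp_all
      | cons b t' =>
          have h' : (b :: t').getLast? = some j := by simpa using h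
          have := ih h'
          simp only [List.cons_append, List.zip_cons_cons, List.tail_cons] at this ⊢
          simp [this]

-- loop invariant for A's fold over indices 1..k, tied to B's boundary table:
-- after k steps the finished runs are B's pairs over (0 :: cuts) and the current
-- run is the consecutive block pyRange (path[j]) (path[j] + (k+1-j)) starting at
-- the last boundary j.
theorem ham_loop_inv (path : List Int) (k : Nat) (hk : k + 1 ≤ path.length) :
    ∃ j : Int, 0 ≤ j ∧ j ≤ (k : Int) ∧
      (0 :: hamCutsTo path ((k : Int) + 1)).getLast? = some j ∧
      PySem.List.pyGetD path (k : Int) 0 = PySem.List.pyGetD path j 0 + ((k : Int) - j) ∧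
      (PySem.List.pyRange 1 ((k : Int) + 1) 1).foldl (hamStepA path) ([], [PySem.List.pyGetD path 0 0])
        = ( ((0 :: hamCutsTo path ((k : Int) + 1)).zip (0 :: hamCutsTo path ((k : Int) + 1)).tail).map (hamEmit path),
            PySem.List.pyRange (PySem.List.pyGetD path j 0)
              (PySem.List.pyGetD path j 0 + ((k : Int) + 1 - j)) 1 ) := by
  induction k with
  | zero =>
      refine ⟨0, le_refl _, le_refl _, ?_, by simp, ?_⟩
      · simp [hamCutsTo, PySem.List.pyRange_one_eq_nil]
      · simp [hamCutsTo, PySem.List.pyRange_one_eq_nil, PySem.List.pyRange_one_singleton]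
  | succ k ih =>
      obtain ⟨j, hj0, hjk, hlast, hval, hfold⟩ := ih (by omega)
      push_cast
      have hsplit : PySem.List.pyRange 1 ((k : Int) + 1 + 1) 1
          = PySem.List.pyRange 1 ((k : Int) + 1) 1 ++ [(k : Int) + 1] :=
        PySem.List.pyRange_one_succ_right (by omega)
      have hidx : ((k : Int) + 1) - 1 = (k : Int) := by ring
      rw [hsplit, List.foldl_append, hfold]
      simp only [List.foldl_cons, List.foldl_nil]
      by_cases hc : PySem.List.pyGetD path ((k : Int) + 1) 0
          = PySem.List.pyGetD path ((k : Int) + 1 - 1) 0 + 1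
      · -- index k+1 continues the current run
        have hcut : hamCutsTo path ((k : Int) + 1 + 1) = hamCutsTo path ((k : Int) + 1) := by
          unfold hamCutsTo
          rw [hsplit, List.filter_append]
          simp only [List.filter_cons, List.filter_nil]
          rw [if_neg (by simpa [hidx] using hc), List.append_nil]
        refine ⟨j, hj0, by omega, by rw [hcut]; exact hlast, ?_, ?_⟩
        · rw [hidx] at hc
          rw [hc, hval]; ring
        · rw [hamStepA, if_pos hc, hcut]
          refine Prod.ext rfl ?_
          show PySem.List.pyRange _ _ 1 ++ [PySem.List.pyGetD path ((k : Int) + 1) 0] = _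
          rw [hidx] at hc
          have hv' : PySem.List.pyGetD path ((k : Int) + 1) 0
              = PySem.List.pyGetD path j 0 + ((k : Int) + 1 - j) := by
            rw [hc, hval]; ring
          rw [hv', ← PySem.List.pyRange_one_succ_right (by omega)]
          rw [show PySem.List.pyGetD path j 0 + ((k : Int) + 1 - j) + 1
              = PySem.List.pyGetD path j 0 + ((k : Int) + 1 + 1 - j) by ring]
      · -- index k+1 starts a new run; A flushes (min, max) = B's emitted pair
        have hcut : hamCutsTo path ((k : Int) + 1 + 1)
            = hamCutsTo path ((k : Int) + 1) ++ [(k : Int) + 1] := by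
          unfold hamCutsTo
          rw [hsplit, List.filter_append]
          simp only [List.filter_cons, List.filter_nil]
          rw [if_pos (by simpa [hidx] using hc)]
        refine ⟨(k : Int) + 1, by omega, by omega, ?_, by omega, ?_⟩
        · rw [hcut, ← List.cons_append, List.getLast?_concat]
        · rw [hamStepA, if_neg hc, hcut]
          have hmin : pyMinNE (PySem.List.pyRange (PySem.List.pyGetD path j 0)
              (PySem.List.pyGetD path j 0 + ((k : Int) + 1 - j)) 1) = PySem.List.pyGetD path j 0 :=
            pyMinNE_pyRange _ _ (by omega)
          have hmax : pyMaxNE (PySem.List.pyRange (PySem.List.pyGetD path j 0)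
              (PySem.List.pyGetD path j 0 + ((k : Int) + 1 - j)) 1)
              = PySem.List.pyGetD path (k : Int) 0 := by
            rw [pyMaxNE_pyRange _ _ (by omega), hval]; ring
          have hzip := zip_tail_append_singleton (0 :: hamCutsTo path ((k : Int) + 1)) j
            ((k : Int) + 1) hlast
          rw [show ((0 :: hamCutsTo path ((k : Int) + 1)) ++ [(k : Int) + 1])
              = 0 :: (hamCutsTo path ((k : Int) + 1) ++ [(k : Int) + 1]) by simp] at hzip
          rw [hzip, List.map_append]
          refine Prod.ext ?_ ?_
          · show _ ++ [(pyMinNE _, pyMaxNE _)] = _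
            rw [hmin, hmax]
            congr 1
            simp only [hamEmit, List.map_cons, List.map_nil]
            rw [hidx]
          · show [PySem.List.pyGetD path ((k : Int) + 1) 0] = _
            rw [show (k : Int) + 1 + 1 - ((k : Int) + 1) = 1 by ring]
            rw [← PySem.List.pyRange_one_singleton]

-- ===== VERDICT (by name: the statement is the Claim_ definition above) =====
theorem ham_path_to_run_decomposition_spec : Claim_equal_ham_path_to_run_decomposition := by
  intro path _
  show ham_path_to_run_decomposition path = ham_path_to_run_decomposition_alt path
  by_cases hne : path = []
  · rw [hne]; rfl
  · have hlen : 1 ≤ path.length := by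
      cases path with
      | nil => exact absurd rfl hne
      | cons a t => simp
    obtain ⟨j, hj0, hjk, hlast, hval, hfold⟩ :=
      ham_loop_inv path (path.length - 1) (by omega)
    have hcast : ((path.length - 1 : Nat) : Int) + 1 = (path.length : Int) := by
      push_cast [hlen]; omega
    rw [hcast] at hlast hfold
    rw [ham_path_to_run_decomposition, if_neg (by omega)]
    rw [ham_path_to_run_decomposition_alt, if_neg hne]
    rw [hfold, hamFlush, hamPairsEmit]
    simp only
    have hmin : pyMinNE (PySem.List.pyRange (PySem.List.pyGetD path j 0)
        (PySem.List.pyGetD path j 0 + ((path.length : Int) - j)) 1)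
        = PySem.List.pyGetD path j 0 := pyMinNE_pyRange _ _ (by omega)
    have hmax : pyMaxNE (PySem.List.pyRange (PySem.List.pyGetD path j 0)
        (PySem.List.pyGetD path j 0 + ((path.length : Int) - j)) 1)
        = PySem.List.pyGetD path ((path.length - 1 : Nat) : Int) 0 := by
      rw [pyMaxNE_pyRange _ _ (by omega), hval]; omega
    rw [hmin, hmax]
    have hzip := zip_tail_append_singleton (0 :: hamCutsTo path (path.length : Int)) j
      ((path.length : Int)) hlast
    rw [show ((0 :: hamCutsTo path (path.length : Int)) ++ [(path.length : Int)])
        = 0 :: (hamCutsTo path (path.length : Int) ++ [(path.length : Int)]) by simp] at hzip ⊢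
    rw [hzip, List.map_append]
    congr 1
    simp only [hamEmit, List.map_cons, List.map_nil]
    rw [show ((path.length : Int) - 1) = ((path.length - 1 : Nat) : Int) by push_cast [hlen]; omega]
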